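-- pv_equiv track=rewrite | github.com/Nafanyan/PythonProjectSeminar | seminar_5_6/task40.py | add_position
-- ===== SOURCE A (Python) =====
-- def add_position(arr,pos,znak):
--     result = []
--     sup_str = ''
--     for i in range(len(arr)):
--         for j in range(len(arr[i])):
--             for k in range(len(arr[i][j])):
--                 if (k == pos[1] and i == pos[0] ): sup_str += znak
--                 else: sup_str += arr[i][j][k]
--         result.append(sup_str)
--         sup_str = ''
--     return result
-- ===== SOURCE B (Python) =====
-- def add_position(arr, pos, znak):
--     def rep(i, s):
--         if s and i == pos[0] and 0 <= pos[1] < len(s):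
--             return s[:pos[1]] + znak + s[pos[1] + 1:]
--         return s
--     return [''.join(rep(i, s) for s in row) for i, row in enumerate(arr)]
-- ===== Notes on version B (the rewrite author's own statement) =====
-- stated objective: simpler
-- what changed: B drops A's innermost per-character index loop and cross-row sentinel string: it maps each inner string to its replacement by whole-string slicing (s[:pos[1]] + znak + s[pos[1]+1:] when the string is nonempty, the row is pos[0] and pos[1] is in range) and joins each row with ''.join in a comprehension.
import Mathlib
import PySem

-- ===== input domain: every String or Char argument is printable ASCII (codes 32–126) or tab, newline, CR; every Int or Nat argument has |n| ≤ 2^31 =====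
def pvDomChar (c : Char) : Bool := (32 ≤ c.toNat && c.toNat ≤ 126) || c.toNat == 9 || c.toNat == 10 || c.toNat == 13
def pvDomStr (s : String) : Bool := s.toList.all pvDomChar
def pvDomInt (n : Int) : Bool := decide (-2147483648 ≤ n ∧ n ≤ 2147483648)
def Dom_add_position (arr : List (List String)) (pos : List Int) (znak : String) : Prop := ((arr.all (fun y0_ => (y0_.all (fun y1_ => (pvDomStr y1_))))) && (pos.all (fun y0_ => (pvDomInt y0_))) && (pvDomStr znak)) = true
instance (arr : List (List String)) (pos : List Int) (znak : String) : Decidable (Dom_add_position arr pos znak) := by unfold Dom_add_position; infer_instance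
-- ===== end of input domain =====

-- B replaces A's innermost per-character loop and sentinel-string accumulation by whole-string
-- slicing per inner string (objective: simpler decomposition, same asymptotic cost).


-- ===== PORT A =====
-- literal port of A: triple nested index loops (Python itself re-indexes arr[i] and arr[i][j] at each
-- use, mirrored by repeated pyGetD); sup_str accumulated as List Char (Python string concatenation),
-- reset after each outer row; pos[1]/pos[0] read via pyGetD, exact under Pre_ (read only when some
-- character exists, and then Pre_ gives len pos ≥ 2)
def add_position (arr : List (List String)) (pos : List Int) (znak : String) : List String :=
  (((PySem.List.pyRange 0 (PySem.List.len arr) 1).foldl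
    (fun (st : List String × List Char) i =>
      (st.1 ++ [String.ofList
        ((PySem.List.pyRange 0 (PySem.List.len (PySem.List.pyGetD arr i [])) 1).foldl
          (fun sup j =>
            (PySem.List.pyRange 0 (PySem.List.len (PySem.List.pyGetD (PySem.List.pyGetD arr i []) j "").toList) 1).foldl
              (fun sup k =>
                if k = PySem.List.pyGetD pos 1 0 ∧ i = PySem.List.pyGetD pos 0 0 then sup ++ znak.toList
                else sup ++ [PySem.List.pyGetD (PySem.List.pyGetD (PySem.List.pyGetD arr i []) j "").toList k ' '])
              sup)
          st.2)], ([] : List Char)))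
    (([] : List String), ([] : List Char))).1)

-- ===== PORT B =====
-- rep: if s is nonempty, the row is pos[0] and 0 <= pos[1] < len(s), replace by slicing
-- s[:pos[1]] + znak + s[pos[1]+1:] via PySem slices; otherwise keep s
def pvRep (pos : List Int) (znak : String) (i : Int) (s : String) : String :=
  let cs := s.toList
  let p1 := PySem.List.pyGetD pos 1 0
  if cs ≠ [] ∧ i = PySem.List.pyGetD pos 0 0 ∧ 0 ≤ p1 ∧ p1 < PySem.List.len cs then
    String.ofList (PySem.List.slice cs none (some p1) ++ znak.toList ++ PySem.List.slice cs (some (p1 + 1)) none)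
  else s

def add_position_alt (arr : List (List String)) (pos : List Int) (znak : String) : List String :=
  (PySem.List.enumerate arr).map (fun p => PySem.Str.join "" (p.2.map (pvRep pos znak p.1)))

-- ===== PRECONDITION & SPEC =====
-- Pre_ excludes exactly the inputs on which A raises IndexError: a pos with fewer than two entries
-- while some inner string is nonempty (A reads pos[1] for every character).
def Pre_add_position (arr : List (List String)) (pos : List Int) (znak : String) : Prop :=
  2 ≤ pos.length ∨ arr.all (fun row => row.all (fun s => s = "")) = true
instance (arr : List (List String)) (pos : List Int) (znak : String) : Decidable (Pre_add_position arr pos znak) := by unfold Pre_add_position; infer_instance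

def pvWitness_add_position : List (List String) × List Int × String := ([["ab", "c"], ["de"]], [0, 1], "*")

def Spec_add_position (arr : List (List String)) (pos : List Int) (znak : String) (out : List String) : Prop := out = add_position_alt arr pos znak
instance (arr : List (List String)) (pos : List Int) (znak : String) (out : List String) : Decidable (Spec_add_position arr pos znak out) := by unfold Spec_add_position; infer_instance

-- ===== CLAIM (what is proved, stated in full; the proofs are below) =====
def Claim_equal_add_position : Prop := ∀ (arr : List (List String)) (pos : List Int) (znak : String), Dom_add_position arr pos znak → Pre_add_position arr pos znak → Spec_add_position arr pos znak (add_position arr pos znak)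

-- ===== LEMMAS AND PROOFS =====

-- ''.join over lists of chars is flatten
theorem pv_intercalate_nil (css : List (List Char)) : ([] : List Char).intercalate css = css.flatten := by
  simp [List.intercalate]
  induction css with
  | nil => rfl
  | cons c cs ih => cases cs <;> simp_all [List.intersperse]

theorem pv_join_empty (parts : List String) :
    PySem.Str.join "" parts = String.ofList ((parts.map String.toList).flatten) := by
  apply String.toList_inj.mp
  rw [PySem.Str.toList_join]
  simp [PySem.Chars.join, pv_intercalate_nil]

-- an index loop over a list via pyGetD is a loop over its enumeration
theorem pv_pyRange_eq_map_fst_enumerate {α : Type} (xs : List α) :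
    PySem.List.pyRange 0 (PySem.List.len xs) = (PySem.List.enumerate xs).map (fun p => p.1) := by
  rw [PySem.List.map_fst_enumerate]; simp [PySem.List.len]

-- replacing the char whose index equals p1 in an enumerated char list
theorem pv_char_flat (z : List Char) (p1 : Int) (cs : List Char) (m : Int) :
    (PySem.List.enumerate cs m).flatMap (fun p => if p.1 = p1 then z else [p.2])
      = if m ≤ p1 ∧ p1 < m + cs.length then
          cs.take (p1 - m).toNat ++ z ++ cs.drop ((p1 - m).toNat + 1)
        else cs := by
  induction cs generalizing m with
  | nil => simp
  | cons c cs ih =>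
    rw [PySem.List.enumerate_cons, List.flatMap_cons, ih (m + 1)]
    by_cases hm : m = p1
    · subst hm
      rw [if_neg (show ¬ (m + 1 ≤ m ∧ m < m + 1 + (cs.length : Int)) by omega),
        if_pos (show m ≤ m ∧ m < m + ((c :: cs).length : Int) by
          simp only [List.length_cons]; push_cast; omega)]
      simp
    · by_cases hin : m + 1 ≤ p1 ∧ p1 < m + 1 + (cs.length : Int)
      · have ht : (p1 - m).toNat = (p1 - (m + 1)).toNat + 1 := by omega
        rw [if_neg hm, if_pos hin,
          if_pos (show m ≤ p1 ∧ p1 < m + ((c :: cs).length : Int) by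
            simp only [List.length_cons]; push_cast; omega),
          ht]
        simp [List.take_succ_cons, List.drop_succ_cons]
      · rw [if_neg hm, if_neg hin,
          if_neg (show ¬ (m ≤ p1 ∧ p1 < m + ((c :: cs).length : Int)) by
            simp only [List.length_cons]; push_cast; omega)]
        simp

-- A's innermost per-character loop produces B's per-string replacement
theorem pv_char_loop (znak : String) (p1 p0 i : Int) (cs : List Char) (sup : List Char) :
    (PySem.List.pyRange 0 (PySem.List.len cs) 1).foldl
      (fun sup k =>
        if k = p1 ∧ i = p0 then sup ++ znak.toList
        else sup ++ [PySem.List.pyGetD cs k ' '])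
      sup
    = sup ++ (if i = p0 ∧ 0 ≤ p1 ∧ p1 < (cs.length : Int) then
          cs.take p1.toNat ++ znak.toList ++ cs.drop (p1.toNat + 1)
        else cs) := by
  rw [show (PySem.List.pyRange 0 (PySem.List.len cs) 1) = (PySem.List.pyRange 0 (PySem.List.len cs)) from rfl,
    pv_pyRange_eq_map_fst_enumerate cs, List.foldl_map]
  rw [PySem.List.foldl_congr_mem (PySem.List.enumerate cs)
      _ (fun sup p => sup ++ (if p.1 = p1 ∧ i = p0 then znak.toList else [p.2])) sup
      (by
        intro acc p hp
        obtain ⟨k, hk, rfl⟩ := (PySem.List.mem_enumerate_iff cs 0 p).mp hp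
        simp only [zero_add, PySem.List.pyGetD_natCast, List.getD_eq_getElem?_getD,
          List.getElem?_eq_getElem hk, Option.getD_some]
        split_ifs <;> rfl)]
  rw [PySem.List.foldl_append_eq_flatMap]
  by_cases hi : i = p0
  · rw [show (fun (p : Int × Char) => if p.1 = p1 ∧ i = p0 then znak.toList else [p.2])
        = (fun p => if p.1 = p1 then znak.toList else [p.2]) from by
      funext p; simp [hi]]
    rw [pv_char_flat znak.toList p1 cs 0]
    by_cases hr : 0 ≤ p1 ∧ p1 < (cs.length : Int)
    · have h1 : (0:Int) ≤ p1 ∧ p1 < 0 + (cs.length : Int) := by omega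
      have h2 : (p1 - 0).toNat = p1.toNat := by omega
      simp only [if_pos h1, h2]
      simp [hi, hr]
    · have h1 : ¬ ((0:Int) ≤ p1 ∧ p1 < 0 + (cs.length : Int)) := by omega
      simp only [if_neg h1]
      simp [hi, hr]
  · rw [show (fun (p : Int × Char) => if p.1 = p1 ∧ i = p0 then znak.toList else [p.2])
        = (fun p => [p.2]) from by funext p; simp [hi]]
    rw [← List.map_eq_flatMap, PySem.List.map_snd_enumerate]
    simp [hi]

-- B's rep, as a char list (the nonemptiness conjunct of pvRep is implied by 0 ≤ p1 < len)
theorem pv_rep_toList (pos : List Int) (znak : String) (i : Int) (s : String) :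
    (pvRep pos znak i s).toList
      = (if i = PySem.List.pyGetD pos 0 0 ∧ 0 ≤ PySem.List.pyGetD pos 1 0 ∧
            PySem.List.pyGetD pos 1 0 < (s.toList.length : Int) then
          s.toList.take (PySem.List.pyGetD pos 1 0).toNat ++ znak.toList
            ++ s.toList.drop ((PySem.List.pyGetD pos 1 0).toNat + 1)
        else s.toList) := by
  unfold pvRep
  by_cases h : i = PySem.List.pyGetD pos 0 0 ∧ 0 ≤ PySem.List.pyGetD pos 1 0 ∧
      PySem.List.pyGetD pos 1 0 < (s.toList.length : Int)
  · have hne : s.toList ≠ [] := by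
      intro hnil
      rw [hnil] at h
      simp at h
      omega
    have hlen : s.toList ≠ [] ∧ i = PySem.List.pyGetD pos 0 0 ∧ 0 ≤ PySem.List.pyGetD pos 1 0 ∧
        PySem.List.pyGetD pos 1 0 < PySem.List.len s.toList := by
      refine ⟨hne, h.1, h.2.1, ?_⟩
      simpa [PySem.List.len] using h.2.2
    rw [if_pos hlen, if_pos h]
    rw [PySem.List.slice_to s.toList h.2.1,
      PySem.List.slice_from s.toList (by omega : (0:Int) ≤ PySem.List.pyGetD pos 1 0 + 1)]
    have : (PySem.List.pyGetD pos 1 0 + 1).toNat = (PySem.List.pyGetD pos 1 0).toNat + 1 := by omega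
    rw [this, String.toList_ofList]
  · have hlen : ¬ (s.toList ≠ [] ∧ i = PySem.List.pyGetD pos 0 0 ∧ 0 ≤ PySem.List.pyGetD pos 1 0 ∧
        PySem.List.pyGetD pos 1 0 < PySem.List.len s.toList) := by
      intro ⟨_, h1, h2, h3⟩
      exact h ⟨h1, h2, by simpa [PySem.List.len] using h3⟩
    rw [if_neg hlen, if_neg h]

-- A's middle loop over one row produces B's joined row, as a char list
theorem pv_row_loop (pos : List Int) (znak : String) (i : Int) (row : List String) (init : List Char) :
    (PySem.List.pyRange 0 (PySem.List.len row) 1).foldl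
      (fun sup j =>
        (PySem.List.pyRange 0 (PySem.List.len (PySem.List.pyGetD row j "").toList) 1).foldl
          (fun sup k =>
            if k = PySem.List.pyGetD pos 1 0 ∧ i = PySem.List.pyGetD pos 0 0 then sup ++ znak.toList
            else sup ++ [PySem.List.pyGetD (PySem.List.pyGetD row j "").toList k ' '])
          sup)
      init
    = init ++ ((row.map (pvRep pos znak i)).map String.toList).flatten := by
  rw [show (PySem.List.pyRange 0 (PySem.List.len row) 1) = (PySem.List.pyRange 0 (PySem.List.len row)) from rfl]
  rw [PySem.List.foldl_pyRange_pyGetD row ""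
      (fun sup s =>
        (PySem.List.pyRange 0 (PySem.List.len s.toList) 1).foldl
          (fun sup k =>
            if k = PySem.List.pyGetD pos 1 0 ∧ i = PySem.List.pyGetD pos 0 0 then sup ++ znak.toList
            else sup ++ [PySem.List.pyGetD s.toList k ' '])
          sup)
      init (by omega)]
  simp only [Int.toNat_zero, List.drop_zero]
  rw [PySem.List.foldl_congr_mem row _
      (fun sup s => sup ++ (pvRep pos znak i s).toList) init
      (by
        intro acc s _
        rw [pv_char_loop znak (PySem.List.pyGetD pos 1 0) (PySem.List.pyGetD pos 0 0) i s.toList acc]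
        simp [pv_rep_toList])]
  rw [PySem.List.foldl_append_eq_flatMap]
  simp [List.flatMap_def, List.map_map, Function.comp_def]

-- the outer loop, over an enumerated arr
theorem pv_outer_loop (pos : List Int) (znak : String) (arr : List (List String)) (a : Int) (acc : List String) :
    ((PySem.List.enumerate arr a).foldl
      (fun (st : List String × List Char) p =>
        (st.1 ++ [String.ofList
          ((PySem.List.pyRange 0 (PySem.List.len p.2) 1).foldl
            (fun sup j =>
              (PySem.List.pyRange 0 (PySem.List.len (PySem.List.pyGetD p.2 j "").toList) 1).foldl
                (fun sup k =>
                  if k = PySem.List.pyGetD pos 1 0 ∧ p.1 = PySem.List.pyGetD pos 0 0 then sup ++ znak.toList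
                  else sup ++ [PySem.List.pyGetD (PySem.List.pyGetD p.2 j "").toList k ' '])
                sup)
            st.2)], ([] : List Char)))
      (acc, ([] : List Char))).1
    = acc ++ (PySem.List.enumerate arr a).map (fun p => PySem.Str.join "" (p.2.map (pvRep pos znak p.1))) := by
  induction arr generalizing a acc with
  | nil => simp
  | cons row rest ih =>
    rw [PySem.List.enumerate_cons, List.foldl_cons, List.map_cons]
    rw [show ((acc, ([] : List Char)).1 ++ [String.ofList
        ((PySem.List.pyRange 0 (PySem.List.len row) 1).foldl
          (fun sup j =>
            (PySem.List.pyRange 0 (PySem.List.len (PySem.List.pyGetD row j "").toList) 1).foldl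
              (fun sup k =>
                if k = PySem.List.pyGetD pos 1 0 ∧ a = PySem.List.pyGetD pos 0 0 then sup ++ znak.toList
                else sup ++ [PySem.List.pyGetD (PySem.List.pyGetD row j "").toList k ' '])
              sup)
          (acc, ([] : List Char)).2)], ([] : List Char))
      = (acc ++ [PySem.Str.join "" (row.map (pvRep pos znak a))], ([] : List Char)) from by
        rw [show ((acc, ([] : List Char)).2) = ([] : List Char) from rfl,
          pv_row_loop pos znak a row, pv_join_empty (row.map (pvRep pos znak a))]
        simp]
    rw [ih (a + 1)]
    simp

-- ===== VERDICT (by name: the statement is the Claim_ definition above) =====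
theorem add_position_spec : Claim_equal_add_position := by
  intro arr pos znak _ _
  unfold Spec_add_position add_position add_position_alt
  rw [show (PySem.List.pyRange 0 (PySem.List.len arr) 1) = (PySem.List.pyRange 0 (PySem.List.len arr)) from rfl,
    pv_pyRange_eq_map_fst_enumerate arr, List.foldl_map]
  rw [PySem.List.foldl_congr_mem (PySem.List.enumerate arr) _
      (fun (st : List String × List Char) p =>
        (st.1 ++ [String.ofList
          ((PySem.List.pyRange 0 (PySem.List.len p.2) 1).foldl
            (fun sup j =>
              (PySem.List.pyRange 0 (PySem.List.len (PySem.List.pyGetD p.2 j "").toList) 1).foldl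
                (fun sup k =>
                  if k = PySem.List.pyGetD pos 1 0 ∧ p.1 = PySem.List.pyGetD pos 0 0 then sup ++ znak.toList
                  else sup ++ [PySem.List.pyGetD (PySem.List.pyGetD p.2 j "").toList k ' '])
                sup)
            st.2)], ([] : List Char)))
      (([] : List String), ([] : List Char))
      (by
        intro acc p hp
        obtain ⟨k, hk, rfl⟩ := (PySem.List.mem_enumerate_iff arr 0 p).mp hp
        simp only [zero_add, PySem.List.pyGetD_natCast, List.getD_eq_getElem?_getD,
          List.getElem?_eq_getElem hk, Option.getD_some])]
  rw [pv_outer_loop pos znak arr 0 []]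
  simp
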